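-- pv_equiv track=rewrite | github.com/MitsuhiroTaniguchi/MahjongLM | src/tenhou_tokenizer/engine.py | encode_tenbo_tokens
-- ===== SOURCE A (Python) =====
-- from typing import Dict, Iterable, List, Optional, Set, Tuple
--
-- TENBO_UNITS: Tuple[Tuple[int, str], ...] = (
--     (10000, "TENBO_10000"),
--     (9000, "TENBO_9000"),
--     (8000, "TENBO_8000"),
--     (7000, "TENBO_7000"),
--     (6000, "TENBO_6000"),
--     (5000, "TENBO_5000"),
--     (4000, "TENBO_4000"),
--     (3000, "TENBO_3000"),
--     (2000, "TENBO_2000"),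
--     (1000, "TENBO_1000"),
--     (900, "TENBO_900"),
--     (800, "TENBO_800"),
--     (700, "TENBO_700"),
--     (600, "TENBO_600"),
--     (500, "TENBO_500"),
--     (400, "TENBO_400"),
--     (300, "TENBO_300"),
--     (200, "TENBO_200"),
--     (100, "TENBO_100"),
-- )
--
-- class TokenizeError(RuntimeError):
--     pass
--
-- def encode_tenbo_tokens(value: int) -> List[str]:
--     if value == 0:
--         return ["TENBO_ZERO"]
--     sign = "TENBO_PLUS" if value > 0 else "TENBO_MINUS"
--     remaining = abs(value)
--     if remaining % 100 != 0:
--         raise TokenizeError(f"score value must be a multiple of 100: {value}")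
--     tokens: List[str] = [sign]
--     for unit_value, unit_token in TENBO_UNITS:
--         count, remaining = divmod(remaining, unit_value)
--         if count:
--             tokens.extend([unit_token] * count)
--     if remaining != 0:
--         raise TokenizeError(f"score value cannot be represented by tenbo units: {value}")
--     return tokens
-- ===== SOURCE B (Python) =====
-- from typing import List
--
-- class TokenizeError(RuntimeError):
--     pass
--
-- def encode_tenbo_tokens(value: int) -> List[str]:
--     if value == 0:
--         return ["TENBO_ZERO"]
--     sign = "TENBO_PLUS" if value > 0 else "TENBO_MINUS"
--     remaining = abs(value)
--     if remaining % 100 != 0: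
--         raise TokenizeError(f"score value must be a multiple of 100: {value}")
--     tokens = [sign]
--     tt, rem = divmod(remaining, 10000)
--     tokens.extend(["TENBO_10000"] * tt)
--     th = rem // 1000
--     if th:
--         tokens.append(f"TENBO_{th * 1000}")
--     h = (rem % 1000) // 100
--     if h:
--         tokens.append(f"TENBO_{h * 100}")
--     return tokens
-- ===== Notes on version B (the rewrite author's own statement) =====
-- stated objective: simpler
-- what changed: Replaces the greedy scan over the 19-entry denomination table with a direct positional decomposition: divmod by 10000 for the repeated ten-thousand token, then at most one thousands token and one hundreds token built by f-string.
import Mathlib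
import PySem

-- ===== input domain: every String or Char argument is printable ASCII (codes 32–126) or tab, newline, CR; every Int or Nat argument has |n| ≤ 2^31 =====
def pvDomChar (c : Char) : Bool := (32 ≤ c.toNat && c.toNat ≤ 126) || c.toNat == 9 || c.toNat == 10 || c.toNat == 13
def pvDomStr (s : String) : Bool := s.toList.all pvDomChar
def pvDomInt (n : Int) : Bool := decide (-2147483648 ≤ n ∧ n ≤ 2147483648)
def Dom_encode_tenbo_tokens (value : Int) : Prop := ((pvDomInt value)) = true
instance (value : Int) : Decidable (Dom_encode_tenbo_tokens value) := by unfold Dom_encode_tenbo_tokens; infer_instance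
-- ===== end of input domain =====

-- B replaces A's greedy scan over the 19-entry denomination table by a direct
-- positional (digit) decomposition; objective: simpler.

-- ===== PORT A =====
def tenboUnits : List (Int × String) :=
  [(10000, "TENBO_10000"), (9000, "TENBO_9000"), (8000, "TENBO_8000"),
   (7000, "TENBO_7000"), (6000, "TENBO_6000"), (5000, "TENBO_5000"),
   (4000, "TENBO_4000"), (3000, "TENBO_3000"), (2000, "TENBO_2000"),
   (1000, "TENBO_1000"), (900, "TENBO_900"), (800, "TENBO_800"),
   (700, "TENBO_700"), (600, "TENBO_600"), (500, "TENBO_500"),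
   (400, "TENBO_400"), (300, "TENBO_300"), (200, "TENBO_200"), (100, "TENBO_100")]

-- one iteration of A's loop body: count, remaining = divmod(remaining, unit); extend
def tenboStep (st : List String × Int) (u : Int × String) : List String × Int :=
  let count := PySem.Int.floordiv st.2 u.1
  let rem := PySem.Int.mod st.2 u.1
  if count ≠ 0 then (st.1 ++ List.replicate count.toNat u.2, rem) else (st.1, rem)

-- A's two `raise TokenizeError` branches are exactly the inputs excluded by Pre_.
def encode_tenbo_tokens (value : Int) : List String :=
  if value = 0 then ["TENBO_ZERO"]
  else
    let sign := if value > 0 then "TENBO_PLUS" else "TENBO_MINUS"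
    let remaining := |value|
    (tenboUnits.foldl tenboStep ([sign], remaining)).1

-- ===== PORT B =====
def encode_tenbo_tokens_alt (value : Int) : List String :=
  if value = 0 then ["TENBO_ZERO"]
  else
    let sign := if value > 0 then "TENBO_PLUS" else "TENBO_MINUS"
    let remaining := |value|
    let tt := PySem.Int.floordiv remaining 10000
    let rem := PySem.Int.mod remaining 10000
    let th := PySem.Int.floordiv rem 1000
    let h := PySem.Int.floordiv (PySem.Int.mod rem 1000) 100
    ([sign] ++ List.replicate tt.toNat "TENBO_10000")
      ++ (if th ≠ 0 then ["TENBO_" ++ PySem.Int.toStr (th * 1000)] else [])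
      ++ (if h ≠ 0 then ["TENBO_" ++ PySem.Int.toStr (h * 100)] else [])

-- ===== PRECONDITION & SPEC =====
-- A raises TokenizeError exactly when value is not a multiple of 100 (its second
-- raise branch is unreachable once the %100 check passes); those inputs are excluded.
def Pre_encode_tenbo_tokens (value : Int) : Prop := PySem.Int.mod value 100 = 0
instance (value : Int) : Decidable (Pre_encode_tenbo_tokens value) := by unfold Pre_encode_tenbo_tokens; infer_instance
def pvWitness_encode_tenbo_tokens : Int := 12300

def Spec_encode_tenbo_tokens (value : Int) (out : List String) : Prop := out = encode_tenbo_tokens_alt value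
instance (value : Int) (out : List String) : Decidable (Spec_encode_tenbo_tokens value out) := by unfold Spec_encode_tenbo_tokens; infer_instance

-- ===== CLAIM (what is proved, stated in full; the proofs are below) =====
def Claim_equal_encode_tenbo_tokens : Prop := ∀ (value : Int), Dom_encode_tenbo_tokens value → Pre_encode_tenbo_tokens value → Spec_encode_tenbo_tokens value (encode_tenbo_tokens value)

-- ===== LEMMAS AND PROOFS =====

-- the step only appends to the token list, so a prefix factors out of the fold
lemma foldl_tenboStep_prefix (l : List (Int × String)) (p : List String) (r : Int) :
    l.foldl tenboStep (p, r) =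
      (p ++ (l.foldl tenboStep ([], r)).1, (l.foldl tenboStep ([], r)).2) := by
  induction l generalizing p r with
  | nil => simp
  | cons u l ih =>
    simp only [List.foldl_cons]
    rw [ih, tenboStep, tenboStep]
    by_cases h : PySem.Int.floordiv r u.1 ≠ 0 <;>
      simp [h, ih (List.replicate (PySem.Int.floordiv r u.1).toNat u.2) (PySem.Int.mod r u.1)]

-- the 18 units below 10000, processed on a remainder that is a two-digit
-- (thousands, hundreds) multiple of 100: checked case by case
lemma tail_fold_eq (th h : Int) (hth0 : 0 ≤ th) (hth : th < 10) (hh0 : 0 ≤ h) (hh : h < 10) :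
    ((tenboUnits.drop 1).foldl tenboStep ([], 1000 * th + 100 * h)).1 =
      (if th ≠ 0 then ["TENBO_" ++ PySem.Int.toStr (th * 1000)] else [])
        ++ (if h ≠ 0 then ["TENBO_" ++ PySem.Int.toStr (h * 100)] else []) := by
  interval_cases th <;> interval_cases h <;> decide

theorem encode_tenbo_tokens_spec : Claim_equal_encode_tenbo_tokens := by
  intro value _ hpre
  unfold Spec_encode_tenbo_tokens encode_tenbo_tokens encode_tenbo_tokens_alt
  by_cases hz : value = 0
  · simp [hz]
  · simp only [hz, if_false]
    have habs : (0:Int) ≤ |value| := abs_nonneg value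
    have h100 : |value| % 100 = 0 := by
      have h1 : PySem.Int.mod value 100 = value % 100 :=
        PySem.Int.mod_eq_emod_of_pos (by norm_num)
      have h2 : value % 100 = 0 := by rw [← h1]; exact hpre
      rcases abs_choice value with h | h <;> omega
    have hrem' : PySem.Int.mod |value| 10000 = |value| % 10000 :=
      PySem.Int.mod_eq_emod_of_pos (by norm_num)
    have htt' : PySem.Int.floordiv |value| 10000 = |value| / 10000 :=
      PySem.Int.floordiv_eq_ediv_of_pos (by norm_num)
    have hth' : PySem.Int.floordiv (PySem.Int.mod |value| 10000) 1000
        = (|value| % 10000) / 1000 := by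
      rw [hrem']; exact PySem.Int.floordiv_eq_ediv_of_pos (by norm_num)
    have hm1000 : PySem.Int.mod (PySem.Int.mod |value| 10000) 1000
        = (|value| % 10000) % 1000 := by
      rw [hrem']; exact PySem.Int.mod_eq_emod_of_pos (by norm_num)
    have hhd' : PySem.Int.floordiv (PySem.Int.mod (PySem.Int.mod |value| 10000) 1000) 100
        = ((|value| % 10000) % 1000) / 100 := by
      rw [hm1000]; exact PySem.Int.floordiv_eq_ediv_of_pos (by norm_num)
    -- the remainder after the 10000 step decomposes into its two remaining digits
    have hdecomp : PySem.Int.mod |value| 10000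
        = 1000 * PySem.Int.floordiv (PySem.Int.mod |value| 10000) 1000
          + 100 * PySem.Int.floordiv (PySem.Int.mod (PySem.Int.mod |value| 10000) 1000) 100 := by
      rw [hth', hhd', hrem']; omega
    have hthb : 0 ≤ PySem.Int.floordiv (PySem.Int.mod |value| 10000) 1000 ∧
        PySem.Int.floordiv (PySem.Int.mod |value| 10000) 1000 < 10 := by
      rw [hth']; omega
    have hhdb : 0 ≤ PySem.Int.floordiv (PySem.Int.mod (PySem.Int.mod |value| 10000) 1000) 100 ∧
        PySem.Int.floordiv (PySem.Int.mod (PySem.Int.mod |value| 10000) 1000) 100 < 10 := by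
      rw [hhd']; omega
    set TH := PySem.Int.floordiv (PySem.Int.mod |value| 10000) 1000 with hTH
    set HD := PySem.Int.floordiv (PySem.Int.mod (PySem.Int.mod |value| 10000) 1000) 100 with hHD
    -- peel the first (10000) iteration of A's loop
    rw [show tenboUnits = (10000, "TENBO_10000") :: tenboUnits.drop 1 from rfl,
      List.foldl_cons]
    have hstep : tenboStep ([if value > 0 then "TENBO_PLUS" else "TENBO_MINUS"], |value|)
        (10000, "TENBO_10000")
        = ([if value > 0 then "TENBO_PLUS" else "TENBO_MINUS"]
            ++ List.replicate (PySem.Int.floordiv |value| 10000).toNat "TENBO_10000",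
           PySem.Int.mod |value| 10000) := by
      unfold tenboStep
      by_cases hc : PySem.Int.floordiv |value| 10000 ≠ 0
      · simp; omega
      · simp only [ne_eq, not_not] at hc
        simp; omega
    rw [hstep, foldl_tenboStep_prefix, hdecomp,
      tail_fold_eq TH HD hthb.1 hthb.2 hhdb.1 hhdb.2]
    simp [List.append_assoc]
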